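-- pv_equiv track=rewrite | github.com/Drago-Vrc/Drago-s-Vrchat-Moderation-Tool | Drago's Moderation tool v0.1.0/src/kryzln_vrc_logger/gui.py | _compute_risk_level
-- ===== SOURCE A (Python) =====
-- def _compute_risk_level(users: object) -> str:
--     if not isinstance(users, list) or not users:
--         return "GREEN"
--
--     max_crash = 0
--     max_switches = 0
--     max_joins = 0
--     for row in users:
--         if not isinstance(row, dict):
--             continue
--         try:
--             max_crash = max(max_crash, int(row.get("crash_correlation", 0) or 0))
--             max_switches = max(max_switches, int(row.get("switches_recent", 0) or 0))
--             max_joins = max(max_joins, int(row.get("joins_recent", 0) or 0))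
--         except (TypeError, ValueError):
--             continue
--
--     # Risk watch is a hint, not a verdict.
--     if max_crash >= 4 or max_switches >= 18:
--         return "RED"
--     if max_crash >= 1 or max_switches >= 10 or max_joins >= 7:
--         return "YELLOW"
--     return "GREEN"
-- ===== SOURCE B (Python) =====
-- def _compute_risk_level(users: object) -> str:
--     if not isinstance(users, list) or not users:
--         return "GREEN"
--
--     level = 0
--     for row in users:
--         if not isinstance(row, dict):
--             continue
--         try:
--             crash = int(row.get("crash_correlation", 0) or 0)
--             switches = int(row.get("switches_recent", 0) or 0)
--             joins = int(row.get("joins_recent", 0) or 0)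
--         except (TypeError, ValueError):
--             continue
--         if crash >= 4 or switches >= 18:
--             row_level = 2
--         elif crash >= 1 or switches >= 10 or joins >= 7:
--             row_level = 1
--         else:
--             row_level = 0
--         level = max(level, row_level)
--
--     return ("GREEN", "YELLOW", "RED")[level]
-- ===== Notes on version B (the rewrite author's own statement) =====
-- stated objective: alternative
-- what changed: B classifies each row into a numeric risk level and keeps one running maximum level, instead of A's three per-metric running maxima classified once at the end; correctness relies on the classification commuting with componentwise max.
import Mathlib
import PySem

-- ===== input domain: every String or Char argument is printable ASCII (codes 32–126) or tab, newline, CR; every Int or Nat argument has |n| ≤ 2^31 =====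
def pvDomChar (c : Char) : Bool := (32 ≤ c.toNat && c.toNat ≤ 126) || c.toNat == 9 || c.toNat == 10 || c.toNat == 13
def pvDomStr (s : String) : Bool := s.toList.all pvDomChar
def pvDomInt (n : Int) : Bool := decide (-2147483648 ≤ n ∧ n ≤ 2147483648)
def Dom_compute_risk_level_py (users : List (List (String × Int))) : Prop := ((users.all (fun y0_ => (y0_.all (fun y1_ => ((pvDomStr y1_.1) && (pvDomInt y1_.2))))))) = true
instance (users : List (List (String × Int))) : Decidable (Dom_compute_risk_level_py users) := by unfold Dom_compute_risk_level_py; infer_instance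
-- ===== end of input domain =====

-- B replaces A's three per-metric running maxima (classified once at the end) by a per-row
-- numeric risk level and a single running maximum level; same O(n) cost, different decomposition.
-- Under the type convention every row is a dict str->int, so isinstance is always true and
-- int(v or 0) = v for an int v (never raises): the try/except never fires on this domain.

-- ===== PORT A =====
-- one row's update of the three maxima (int(row.get(k,0) or 0) = row.get(k,0) on int dicts)
def pvStepA (m : Int × Int × Int) (row : List (String × Int)) : Int × Int × Int :=
  (max m.1 (PySem.Dict.getD (PySem.Dict.mk row) "crash_correlation" 0),
   max m.2.1 (PySem.Dict.getD (PySem.Dict.mk row) "switches_recent" 0),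
   max m.2.2 (PySem.Dict.getD (PySem.Dict.mk row) "joins_recent" 0))

def compute_risk_level_py (users : List (List (String × Int))) : String :=
  if users = [] then "GREEN"
  else
    let m := users.foldl pvStepA (0, 0, 0)
    if m.1 ≥ 4 ∨ m.2.1 ≥ 18 then "RED"
    else if m.1 ≥ 1 ∨ m.2.1 ≥ 10 ∨ m.2.2 ≥ 7 then "YELLOW"
    else "GREEN"

-- ===== PORT B =====
def pvRowLevel (crash switches joins : Int) : Nat :=
  if crash ≥ 4 ∨ switches ≥ 18 then 2
  else if crash ≥ 1 ∨ switches ≥ 10 ∨ joins ≥ 7 then 1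
  else 0

def pvLevelStr (l : Nat) : String :=
  match l with
  | 0 => "GREEN"
  | 1 => "YELLOW"
  | _ => "RED"

def pvStepB (l : Nat) (row : List (String × Int)) : Nat :=
  max l (pvRowLevel (PySem.Dict.getD (PySem.Dict.mk row) "crash_correlation" 0)
                    (PySem.Dict.getD (PySem.Dict.mk row) "switches_recent" 0)
                    (PySem.Dict.getD (PySem.Dict.mk row) "joins_recent" 0))

def compute_risk_level_py_alt (users : List (List (String × Int))) : String :=
  if users = [] then "GREEN"
  else pvLevelStr (users.foldl pvStepB 0)

-- ===== PRECONDITION & SPEC =====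
def Spec_compute_risk_level_py (users : List (List (String × Int))) (out : String) : Prop := out = compute_risk_level_py_alt users
instance (users : List (List (String × Int))) (out : String) : Decidable (Spec_compute_risk_level_py users out) := by unfold Spec_compute_risk_level_py; infer_instance

-- ===== CLAIM (what is proved, stated in full; the proofs are below) =====
def Claim_equal_compute_risk_level_py : Prop := ∀ (users : List (List (String × Int))), Dom_compute_risk_level_py users → Spec_compute_risk_level_py users (compute_risk_level_py users)

-- ===== LEMMAS AND PROOFS =====

-- classification commutes with componentwise max
theorem pvRowLevel_max (a b c x y z : Int) :
    pvRowLevel (max a x) (max b y) (max c z) = max (pvRowLevel a b c) (pvRowLevel x y z) := by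
  unfold pvRowLevel
  split_ifs <;> omega

-- the loop invariant: classifying A's state equals B's running level
theorem pvFold_level (rows : List (List (String × Int))) (m : Int × Int × Int) :
    pvRowLevel (rows.foldl pvStepA m).1 (rows.foldl pvStepA m).2.1 (rows.foldl pvStepA m).2.2
      = rows.foldl pvStepB (pvRowLevel m.1 m.2.1 m.2.2) := by
  induction rows generalizing m with
  | nil => rfl
  | cons r rs ih =>
      simp only [List.foldl_cons]
      rw [ih]
      congr 1
      simpa [pvStepA, pvStepB] using
        pvRowLevel_max m.1 m.2.1 m.2.2 (PySem.Dict.getD (PySem.Dict.mk r) "crash_correlation" 0)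
          (PySem.Dict.getD (PySem.Dict.mk r) "switches_recent" 0) (PySem.Dict.getD (PySem.Dict.mk r) "joins_recent" 0)

-- A's final if-chain is exactly pvLevelStr ∘ pvRowLevel
theorem pvClassify_eq (a b c : Int) :
    (if a ≥ 4 ∨ b ≥ 18 then "RED"
     else if a ≥ 1 ∨ b ≥ 10 ∨ c ≥ 7 then "YELLOW"
     else "GREEN") = pvLevelStr (pvRowLevel a b c) := by
  unfold pvRowLevel pvLevelStr
  split_ifs <;> rfl

-- ===== VERDICT (by name: the statement is the Claim_ definition above) =====
theorem compute_risk_level_py_spec : Claim_equal_compute_risk_level_py := by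
  intro users _
  unfold Spec_compute_risk_level_py compute_risk_level_py compute_risk_level_py_alt
  by_cases h : users = []
  · simp [h]
  · simp only [h]
    rw [pvClassify_eq, pvFold_level]
    rfl
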